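-- pv_equiv track=rewrite | github.com/pdhawal22443/GeeksForGeeks | NumOfJumpsToCroSSWalls.py | jumpsForAWall
-- ===== SOURCE A (Python) =====
-- def jumpsForAWall(hight,num1,num2):
--     i = 0
--     count = 0
--
--     if hight == num1 or hight < num1:
--         return 1
--     else:
--         while i <= hight:
--             i = i + (num1 - num2)
--             count += 1
--         return count
-- ===== SOURCE B (Python) =====
-- def jumpsForAWall(hight, num1, num2):
--     # closed form: each effective jump gains (num1 - num2)
--     if hight <= num1:
--         return 1
--     if hight < 0:
--         return 0
--     return hight // (num1 - num2) + 1
-- ===== Notes on version B (the rewrite author's own statement) =====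
-- stated objective: simpler
-- what changed: Replaced the step-by-step while loop with the closed form hight // (num1 - num2) + 1 (with the hight <= num1 and hight < 0 cases handled directly).
import Mathlib
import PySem

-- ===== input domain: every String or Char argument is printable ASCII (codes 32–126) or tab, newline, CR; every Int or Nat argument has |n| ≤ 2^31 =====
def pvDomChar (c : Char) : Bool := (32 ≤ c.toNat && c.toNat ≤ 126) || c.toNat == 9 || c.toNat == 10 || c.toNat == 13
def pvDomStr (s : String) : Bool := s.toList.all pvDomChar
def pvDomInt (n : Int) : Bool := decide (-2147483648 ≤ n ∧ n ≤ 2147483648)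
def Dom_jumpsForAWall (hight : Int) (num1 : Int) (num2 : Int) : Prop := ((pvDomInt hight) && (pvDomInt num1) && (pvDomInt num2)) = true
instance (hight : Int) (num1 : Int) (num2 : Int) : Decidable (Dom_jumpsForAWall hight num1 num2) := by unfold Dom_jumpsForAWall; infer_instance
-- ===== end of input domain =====

-- B replaces A's step-by-step while loop by the closed form hight // (num1-num2) + 1 (simpler).

-- ===== PORT A =====
-- A's while loop, fuel-bounded for totality; inside Pre_ the fuel is always sufficient.
def jumpsLoop (hight d : Int) : Nat → Int → Int → Int
  | 0, _, count => count
  | Nat.succ n, i, count =>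
      if i ≤ hight then jumpsLoop hight d n (i + d) (count + 1) else count

def jumpsForAWall (hight : Int) (num1 : Int) (num2 : Int) : Int :=
  if hight = num1 ∨ hight < num1 then 1
  else jumpsLoop hight (num1 - num2) (hight.toNat + 2) 0 0

-- ===== PORT B =====
def jumpsForAWall_alt (hight : Int) (num1 : Int) (num2 : Int) : Int :=
  if hight ≤ num1 then 1
  else if hight < 0 then 0
  else PySem.Int.floordiv hight (num1 - num2) + 1

-- ===== PRECONDITION & SPEC =====
-- Pre_ excludes exactly the inputs on which A's while loop never terminates
-- (hight > num1, hight ≥ 0, and a non-positive step num1 - num2).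
def Pre_jumpsForAWall (hight : Int) (num1 : Int) (num2 : Int) : Prop :=
  hight ≤ num1 ∨ hight < 0 ∨ 0 < num1 - num2
instance (hight : Int) (num1 : Int) (num2 : Int) : Decidable (Pre_jumpsForAWall hight num1 num2) := by
  unfold Pre_jumpsForAWall; infer_instance

def pvWitness_jumpsForAWall : Int × Int × Int := (10, 3, 1)

def Spec_jumpsForAWall (hight : Int) (num1 : Int) (num2 : Int) (out : Int) : Prop :=
  out = jumpsForAWall_alt hight num1 num2
instance (hight : Int) (num1 : Int) (num2 : Int) (out : Int) : Decidable (Spec_jumpsForAWall hight num1 num2 out) := by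
  unfold Spec_jumpsForAWall; infer_instance

-- ===== CLAIM =====
def Claim_equal_jumpsForAWall : Prop := ∀ (hight : Int) (num1 : Int) (num2 : Int), Dom_jumpsForAWall hight num1 num2 → Pre_jumpsForAWall hight num1 num2 → Spec_jumpsForAWall hight num1 num2 (jumpsForAWall hight num1 num2)

-- ===== LEMMAS AND PROOFS =====

-- Loop characterisation: with positive step d and enough fuel, the loop counts
-- (hight - i) / d + 1 further iterations from state (i, count).
theorem jumpsLoop_eq (hight d : Int) (hd : 0 < d) :
    ∀ (fuel : Nat) (i count : Int), i ≤ hight → hight - i < fuel * d →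
      jumpsLoop hight d fuel i count = count + ((hight - i).fdiv d + 1) := by
  intro fuel
  induction fuel with
  | zero => intro i count hi hf; simp at hf; omega
  | succ n ih =>
    intro i count hi hf
    rw [jumpsLoop, if_pos hi]
    by_cases h2 : i + d ≤ hight
    · rw [ih (i + d) (count + 1) h2 (by push_cast at hf ⊢; nlinarith)]
      have : hight - i = (hight - (i + d)) + 1 * d := by ring
      rw [this, Int.add_mul_fdiv_right _ _ (by omega : d ≠ 0)]
      ring
    · have h3 : 0 ≤ hight - i := by omega
      have h4 : hight - i < d := by omega
      have : (hight - i).fdiv d = 0 := by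
        simp [Int.fdiv_eq_ediv, Int.le_of_lt hd]
        exact Int.ediv_eq_zero_of_lt h3 h4
      rw [this]
      cases n with
      | zero => simp [jumpsLoop]
      | succ m => rw [jumpsLoop, if_neg h2]; ring

-- ===== VERDICT =====
theorem jumpsForAWall_spec : Claim_equal_jumpsForAWall := by
  intro hight num1 num2 _ hpre
  unfold Spec_jumpsForAWall jumpsForAWall jumpsForAWall_alt
  by_cases h1 : hight ≤ num1
  · rw [if_pos (by omega), if_pos h1]
  · rw [if_neg (by omega), if_neg h1]
    by_cases h2 : hight < 0
    · rw [if_pos h2]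
      have : hight.toNat + 2 = Nat.succ (hight.toNat + 1) := rfl
      rw [this, jumpsLoop, if_neg (by omega)]
    · rw [if_neg h2]
      have hd : 0 < num1 - num2 := by
        rcases hpre with h | h | h <;> omega
      have hfuel : hight - 0 < ((hight.toNat + 2 : Nat) : Int) * (num1 - num2) := by
        push_cast
        nlinarith [Int.toNat_of_nonneg (by omega : (0:Int) ≤ hight)]
      rw [jumpsLoop_eq hight (num1 - num2) hd _ 0 0 (by omega) hfuel]
      rw [PySem.Int.floordiv_eq_ediv_of_pos hd]
      have hediv : (hight - 0).fdiv (num1 - num2) = hight / (num1 - num2) := by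
        rw [Int.fdiv_eq_ediv, if_pos (Or.inl (Int.le_of_lt hd))]; simp
      rw [hediv]; ring
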